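-- pv_equiv track=rewrite | github.com/madhukirans/terraform-plan-to-json | terraform_plan_to_json.py | find_string_end_delimiter_pos
-- ===== SOURCE A (Python) =====
-- def find_string_end_delimiter_pos(str, from_index):
--
--     pos = from_index
--     escaped = False
--     end = len(str)
--     while (pos < end):
--         if (escaped):
--             escaped = False
--         else:
--             if (str[pos] == '"'):
--                 return pos
--             elif (str[pos] == '\\'):
--                 escaped = True
--
--         pos = pos + 1
--
--     return -1
-- ===== SOURCE B (Python) =====
-- def find_string_end_delimiter_pos(str, from_index):
--     end = len(str)
--     for p in range(from_index, end):
--         if str[p] == '"':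
--             # count the run of backslashes immediately before p (not before from_index)
--             k = 0
--             while p - 1 - k >= from_index and str[p - 1 - k] == '\\':
--                 k += 1
--             if k % 2 == 0:
--                 return p
--     return -1
-- ===== Notes on version B (the rewrite author's own statement) =====
-- stated objective: alternative
-- what changed: Instead of simulating the scanner's escaped flag, B looks only at quote positions and decides each one by the parity of the run of backslashes immediately preceding it (truncated at from_index), returning the first quote with an even run; per-character work drops to one comparison.
import Mathlib
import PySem

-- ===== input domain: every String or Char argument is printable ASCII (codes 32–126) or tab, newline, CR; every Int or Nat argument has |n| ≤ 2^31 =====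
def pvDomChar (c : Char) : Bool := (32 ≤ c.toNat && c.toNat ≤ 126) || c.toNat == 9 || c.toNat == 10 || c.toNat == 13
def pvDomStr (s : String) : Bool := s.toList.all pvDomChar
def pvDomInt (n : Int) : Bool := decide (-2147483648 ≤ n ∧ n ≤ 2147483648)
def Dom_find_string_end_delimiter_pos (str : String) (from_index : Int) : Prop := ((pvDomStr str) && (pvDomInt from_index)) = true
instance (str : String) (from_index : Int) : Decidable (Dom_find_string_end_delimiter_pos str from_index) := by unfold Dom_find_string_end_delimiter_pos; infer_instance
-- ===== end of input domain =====

-- B drops A's escaped-flag scanner: it examines only quote positions and accepts the first one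
-- preceded by an even run of backslashes (run truncated at from_index); objective: alternative.

-- ===== PORT A =====
-- while-loop of A with state (pos, escaped); str[pos] via PySem.List.pyGet? (none = IndexError, excluded by Pre_; -2 is an unreachable placeholder there)
def pvLoopA (s : List Char) (endn : Int) (pos : Int) (escaped : Bool) : Int :=
  if pos < endn then
    if escaped then pvLoopA s endn (pos + 1) false
    else
      match PySem.List.pyGet? s pos with
      | none => -2
      | some c =>
        if c = '"' then pos
        else if c = '\\' then pvLoopA s endn (pos + 1) true
        else pvLoopA s endn (pos + 1) false
  else -1
termination_by (endn - pos).toNat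
decreasing_by all_goals omega

def find_string_end_delimiter_pos (str : String) (from_index : Int) : Int :=
  pvLoopA str.toList (PySem.Str.len str) from_index false

-- ===== PORT B =====
-- inner while-loop of B: length of the run of backslashes at j, j-1, … down to (not past) from0
def pvCountBack (s : List Char) (from0 : Int) (j : Int) : Nat :=
  if from0 ≤ j then
    match PySem.List.pyGet? s j with
    | some c => if c = '\\' then pvCountBack s from0 (j - 1) + 1 else 0
    | none => 0
  else 0
termination_by (j - from0 + 1).toNat
decreasing_by all_goals omega

-- outer for-loop of B over p = from_index … end-1, testing only quote positions
def pvLoopB (s : List Char) (endn : Int) (from0 : Int) (pos : Int) : Int :=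
  if pos < endn then
    match PySem.List.pyGet? s pos with
    | none => -2
    | some c =>
      if c = '"' then
        if pvCountBack s from0 (pos - 1) % 2 = 0 then pos
        else pvLoopB s endn from0 (pos + 1)
      else pvLoopB s endn from0 (pos + 1)
  else -1
termination_by (endn - pos).toNat
decreasing_by all_goals omega

def find_string_end_delimiter_pos_alt (str : String) (from_index : Int) : Int :=
  pvLoopB str.toList (PySem.Str.len str) from_index from_index

-- ===== PRECONDITION & SPEC =====
-- Pre_ excludes exactly the inputs on which A (and B alike) raises IndexError:
-- from_index < -len(str), where str[pos] is first evaluated out of range.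
def Pre_find_string_end_delimiter_pos (str : String) (from_index : Int) : Prop :=
  -(str.toList.length : Int) ≤ from_index
instance (str : String) (from_index : Int) : Decidable (Pre_find_string_end_delimiter_pos str from_index) := by unfold Pre_find_string_end_delimiter_pos; infer_instance

def pvWitness_find_string_end_delimiter_pos : String × Int := ("ab\"c", 0)

def Spec_find_string_end_delimiter_pos (str : String) (from_index : Int) (out : Int) : Prop := out = find_string_end_delimiter_pos_alt str from_index
instance (str : String) (from_index : Int) (out : Int) : Decidable (Spec_find_string_end_delimiter_pos str from_index out) := by unfold Spec_find_string_end_delimiter_pos; infer_instance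

-- ===== CLAIM =====
def Claim_equal_find_string_end_delimiter_pos : Prop := ∀ (str : String) (from_index : Int), Dom_find_string_end_delimiter_pos str from_index → Pre_find_string_end_delimiter_pos str from_index → Spec_find_string_end_delimiter_pos str from_index (find_string_end_delimiter_pos str from_index)

-- ===== LEMMAS AND PROOFS =====

theorem pvCountBack_not_bs (s : List Char) (from0 j : Int) (c : Char)
    (h : PySem.List.pyGet? s j = some c) (hc : c ≠ '\\') :
    pvCountBack s from0 j = 0 := by
  rw [pvCountBack]
  split
  · rw [h]; simp [hc]
  · rfl

theorem pvCountBack_bs (s : List Char) (from0 j : Int)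
    (hle : from0 ≤ j) (h : PySem.List.pyGet? s j = some '\\') :
    pvCountBack s from0 j = pvCountBack s from0 (j - 1) + 1 := by
  rw [pvCountBack, if_pos hle, h]; simp

theorem pvCountBack_out (s : List Char) (from0 j : Int) (h : ¬ from0 ≤ j) :
    pvCountBack s from0 j = 0 := by
  rw [pvCountBack, if_neg h]

-- core equivalence: A's flag equals the parity of the backslash run just below pos
theorem pvLoop_eq (s : List Char) (from0 pos : Int) (esc : Bool)
    (hpre : -(s.length : Int) ≤ from0) (hfp : from0 ≤ pos)
    (hesc : esc = decide (pvCountBack s from0 (pos - 1) % 2 = 1)) :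
    pvLoopA s (s.length : Int) pos esc = pvLoopB s (s.length : Int) from0 pos := by
  by_cases h : pos < (s.length : Int)
  · obtain ⟨c, hc⟩ : ∃ c, PySem.List.pyGet? s pos = some c := by
      cases hg : PySem.List.pyGet? s pos with
      | some c => exact ⟨c, rfl⟩
      | none =>
        exfalso
        have := (PySem.List.pyGet?_eq_none_iff (xs := s) (i := pos)).mp hg
        exact this ⟨by omega, by simpa using h⟩
    rw [pvLoopA.eq_def, pvLoopB.eq_def]
    simp only [if_pos h, hc]
    by_cases hq : c = '"'
    · subst hq
      rw [if_pos rfl]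
      by_cases hpar : pvCountBack s from0 (pos - 1) % 2 = 0
      · rw [if_pos hpar]
        have : esc = false := by rw [hesc]; simp; omega
        simp [this]
      · rw [if_neg hpar]
        have : esc = true := by rw [hesc]; simp; omega
        rw [this]
        rw [if_pos rfl]
        have hz : pvCountBack s from0 (pos + 1 - 1) = 0 := by
          rw [show pos + 1 - 1 = pos by ring]
          exact pvCountBack_not_bs s from0 pos '"' hc (by decide)
        exact pvLoop_eq s from0 (pos + 1) false hpre (by omega)
          (by rw [hz]; simp)
    · by_cases hb : c = '\\'
      · subst hb
        cases hE : esc with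
        | true =>
          simp only [if_neg hq]
          have hcnt : pvCountBack s from0 (pos + 1 - 1) % 2 = 0 := by
            rw [show pos + 1 - 1 = pos by ring,
               pvCountBack_bs s from0 pos hfp hc]
            have : pvCountBack s from0 (pos - 1) % 2 = 1 := by
              have := hesc; rw [hE] at this; simpa using this.symm
            omega
          exact pvLoop_eq s from0 (pos + 1) false hpre (by omega)
            (by rw [hcnt]; simp)
        | false =>
          simp only [Bool.false_eq_true, if_false, if_neg hq]
          have hcnt : pvCountBack s from0 (pos + 1 - 1) % 2 = 1 := by
            rw [show pos + 1 - 1 = pos by ring,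
               pvCountBack_bs s from0 pos hfp hc]
            have : ¬ pvCountBack s from0 (pos - 1) % 2 = 1 := by
              have := hesc; rw [hE] at this
              intro hh; rw [hh] at this; simp at this
            omega
          exact pvLoop_eq s from0 (pos + 1) true hpre (by omega)
            (by rw [hcnt]; simp)
      · have hz : pvCountBack s from0 (pos + 1 - 1) = 0 := by
          rw [show pos + 1 - 1 = pos by ring]
          exact pvCountBack_not_bs s from0 pos c hc hb
        have hrec := pvLoop_eq s from0 (pos + 1) false hpre (by omega)
          (by rw [hz]; simp)
        cases hE : esc with
        | true => exact hrec.trans (by rw [pvLoopB.eq_def]; simp [hq])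
        | false => simp only [Bool.false_eq_true, if_false, if_neg hq, if_neg hb, hrec]
  · rw [pvLoopA.eq_def, pvLoopB.eq_def]; simp [h]
termination_by ((s.length : Int) - pos).toNat
decreasing_by all_goals omega

-- ===== VERDICT =====
theorem find_string_end_delimiter_pos_spec : Claim_equal_find_string_end_delimiter_pos := by
  intro str from_index _ hpre
  unfold Spec_find_string_end_delimiter_pos find_string_end_delimiter_pos find_string_end_delimiter_pos_alt
  rw [PySem.Str.len_eq]
  exact pvLoop_eq str.toList from_index from_index false hpre le_rfl
    (by rw [pvCountBack_out str.toList from_index (from_index - 1) (by omega)]; simp)
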